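-- pv_equiv track=rewrite | github.com/edt-yxz-zzd/python3_src | nn_ns/RMQ/LeftBiasedRMQ/ballot_number/ballot_number.py | xballot_numberss_by_accumulate
-- ===== SOURCE A (Python) =====
-- from itertools import accumulate
--
-- def xballot_numberss_by_accumulate(Q):
--     ''':: uint -> [[uint]]
--
-- time O(Q^3)
-- output[q][p] = xballot(q,p) for 0<=p<=q<Q
-- '''
--     if Q <= 0:
--         return []
--
--     pre = [1]
--     xballot = [pre]
--     for q in range(1, Q):
--         xqp = list(accumulate(pre))
--         xqp.append(xqp[-1])
--         pre = xqp
--         xballot.append(pre)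
--     return xballot
-- ===== SOURCE B (Python) =====
-- def xballot_numberss_by_accumulate(Q):
--     ''':: uint -> [[uint]]
--
--     Closed form: xballot(q,p) = C(q+p,p)*(q+1-p)//(q+1) (ballot-number formula).
--     Each row is computed independently from binomial coefficients maintained by
--     the multiplicative rule c = c*(q+p)//p; no row depends on a previous row.
--     '''
--     if Q <= 0:
--         return []
--     res = []
--     for q in range(Q):
--         row = []
--         c = 1  # C(q+p, p)
--         for p in range(q + 1):
--             if p:
--                 c = c * (q + p) // p
--             row.append(c * (q + 1 - p) // (q + 1))
--         res.append(row)
--     return res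
-- ===== Notes on version B (the rewrite author's own statement) =====
-- stated objective: alternative
-- what changed: Replaces the DP that derives each row from the previous row by prefix sums (accumulate + duplicate last) with the closed-form ballot-number formula xballot(q,p) = C(q+p,p)*(q+1-p)//(q+1), each row computed independently from binomial coefficients maintained multiplicatively.
import Mathlib
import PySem

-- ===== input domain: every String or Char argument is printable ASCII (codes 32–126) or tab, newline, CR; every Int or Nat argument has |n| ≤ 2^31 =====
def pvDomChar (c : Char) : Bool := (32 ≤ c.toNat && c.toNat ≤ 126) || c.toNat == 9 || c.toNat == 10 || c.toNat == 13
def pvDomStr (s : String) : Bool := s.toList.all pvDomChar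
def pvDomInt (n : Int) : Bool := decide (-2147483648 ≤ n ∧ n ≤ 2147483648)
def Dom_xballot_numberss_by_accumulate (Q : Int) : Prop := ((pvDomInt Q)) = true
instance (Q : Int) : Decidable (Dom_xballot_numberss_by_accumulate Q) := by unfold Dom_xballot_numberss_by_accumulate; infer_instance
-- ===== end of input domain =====

-- B replaces the row-from-previous-row prefix-sum DP by the closed-form ballot-number
-- formula C(q+p,p)*(q+1-p)//(q+1), each row computed independently (objective: alternative).

-- ===== PORT A =====
-- itertools.accumulate with running total `acc` (default operator +, no initial)
def pyAccumulate (acc : Int) : List Int → List Int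
  | [] => []
  | x :: xs => (acc + x) :: pyAccumulate (acc + x) xs

def xballot_numberss_by_accumulate (Q : Int) : List (List Int) :=
  if Q ≤ 0 then []
  else
    (PySem.List.pyRange 1 Q 1).foldl
      (fun (st : List Int × List (List Int)) _q =>
        let xqp := pyAccumulate 0 st.1
        -- xqp.append(xqp[-1]); xqp is nonempty here (pre is never empty), so [-1] = last
        let xqp := xqp ++ [xqp.getLast!]
        (xqp, st.2 ++ [xqp]))
      ([1], [[1]])
    |>.2

-- ===== PORT B =====
def xballot_numberss_by_accumulate_alt (Q : Int) : List (List Int) :=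
  if Q ≤ 0 then []
  else
    (List.range Q.toNat).foldl
      (fun (res : List (List Int)) q =>
        let row := ((List.range (q + 1)).foldl
          (fun (st : Int × List Int) (p : Nat) =>
            let c := if p = 0 then st.1
                     else PySem.Int.floordiv (st.1 * ((q : Int) + (p : Int))) (p : Int)
            (c, st.2 ++ [PySem.Int.floordiv (c * ((q : Int) + 1 - (p : Int))) ((q : Int) + 1)]))
          (1, [])).2
        res ++ [row])
      []

-- ===== PRECONDITION & SPEC =====
def Spec_xballot_numberss_by_accumulate (Q : Int) (out : List (List Int)) : Prop := out = xballot_numberss_by_accumulate_alt Q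
instance (Q : Int) (out : List (List Int)) : Decidable (Spec_xballot_numberss_by_accumulate Q out) := by unfold Spec_xballot_numberss_by_accumulate; infer_instance

-- ===== CLAIM (what is proved, stated in full; the proofs are below) =====
def Claim_equal_xballot_numberss_by_accumulate : Prop := ∀ (Q : Int), Dom_xballot_numberss_by_accumulate Q → Spec_xballot_numberss_by_accumulate Q (xballot_numberss_by_accumulate Q)

-- ===== LEMMAS AND PROOFS =====

-- closed-form entry: the ballot number C(q+p,p) - C(q+p,p-1)
def EZ (q : Nat) : Nat → Int
  | 0 => 1
  | r + 1 => (Nat.choose (q + r + 1) (r + 1) : Int) - (Nat.choose (q + r + 1) r : Int)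

-- multiplicative step of Pascal's row: C(q+r,r)*(q+r+1) = C(q+r+1,r+1)*(r+1)
theorem choose_step (q r : Nat) :
    (Nat.choose (q + r) r : Int) * ((q : Int) + r + 1)
      = (Nat.choose (q + r + 1) (r + 1) : Int) * ((r : Int) + 1) := by
  have hN : (q + r + 1) * Nat.choose (q + r) r = Nat.choose (q + r + 1) (r + 1) * (r + 1) :=
    Nat.add_one_mul_choose_eq (q + r) r
  calc (Nat.choose (q + r) r : Int) * ((q : Int) + r + 1)
      = (((q + r + 1) * Nat.choose (q + r) r : Nat) : Int) := by push_cast; ring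
    _ = ((Nat.choose (q + r + 1) (r + 1) * (r + 1) : Nat) : Int) := by exact_mod_cast hN
    _ = (Nat.choose (q + r + 1) (r + 1) : Int) * ((r : Int) + 1) := by push_cast; ring

-- division identity: (q+1) * EZ q p = (q+1-p) * C(q+p,p)  for p ≤ q
theorem EZ_mul (q p : Nat) (hp : p ≤ q) :
    ((q : Int) + 1) * EZ q p = ((q : Int) + 1 - p) * (Nat.choose (q + p) p : Int) := by
  cases p with
  | zero => simp [EZ]
  | succ r =>
    have h := Nat.choose_succ_right_eq (q + r + 1) r
    have hsub : q + r + 1 - r = q + 1 := by omega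
    rw [hsub] at h
    have hz : (Nat.choose (q + r + 1) (r + 1) : Int) * ((r : Int) + 1)
        = (Nat.choose (q + r + 1) r : Int) * ((q : Int) + 1) := by
      exact_mod_cast congrArg (fun n : Nat => (n : Int)) h
    simp only [EZ]
    have : q + (r + 1) = q + r + 1 := by omega
    rw [this]
    push_cast
    nlinarith [hz]

-- the 2D recurrence, unconditionally
theorem EZ_rec (q p : Nat) : EZ (q + 1) (p + 1) = EZ (q + 1) p + EZ q (p + 1) := by
  cases p with
  | zero =>
    simp [EZ, Nat.choose_one_right]
    ring
  | succ s =>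
    have p3 : q + 1 + (s + 1) + 1 = q + s + 2 + 1 := by omega
    have p4 : q + 1 + s + 1 = q + s + 2 := by omega
    have p5 : q + (s + 1) + 1 = q + s + 2 := by omega
    simp only [EZ, p3, p4, p5, Nat.choose_succ_succ (q + s + 2) (s + 1),
      Nat.choose_succ_succ (q + s + 2) s]
    push_cast
    ring

-- the duplicated last entry: EZ q q = EZ q (q-1)
theorem EZ_top (q : Nat) : EZ (q + 1) (q + 1) = EZ (q + 1) q := by
  cases q with
  | zero => decide
  | succ s =>
    have e1 : s + 1 + 1 + (s + 1) + 1 = (2 * s + 3) + 1 := by omega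
    have e2 : s + 1 + 1 + s + 1 = 2 * s + 3 := by omega
    have hsym : Nat.choose (2 * s + 3) (s + 2) = Nat.choose (2 * s + 3) (s + 1) := by
      have := Nat.choose_symm (n := 2 * s + 3) (k := s + 1) (by omega)
      have e : 2 * s + 3 - (s + 1) = s + 2 := by omega
      rw [e] at this
      exact this
    simp only [EZ, e1, e2, Nat.choose_succ_succ (2 * s + 3) (s + 1),
      Nat.choose_succ_succ (2 * s + 3) s, hsym]
    push_cast
    ring

-- ===== A-side characterisation =====

-- ideal row: entry p of the row following a row with tail t is 1 + sum of the first p entries of t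
def goodRow (t : List Int) (n : Nat) : List Int :=
  (List.range n).map (fun p => 1 + (t.take p).sum)

def rowRec : Nat → List Int
  | 0 => [1]
  | q + 1 => goodRow (rowRec q).tail (q + 2)

theorem goodRow_succ (t : List Int) (n : Nat) :
    goodRow t (n + 1) = goodRow t n ++ [1 + (t.take n).sum] := by
  simp [goodRow, List.range_succ]

theorem rowRec_shape (q : Nat) : ∃ t : List Int, rowRec q = 1 :: t ∧ t.length = q := by
  cases q with
  | zero => exact ⟨[], rfl, rfl⟩
  | succ q =>
    refine ⟨(List.range (q + 1)).map (fun p => 1 + ((rowRec q).tail.take (p + 1)).sum), ?_, by simp⟩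
    simp [rowRec, goodRow, List.range_succ_eq_map, List.map_map, Function.comp]

theorem pyAccumulate_eq (xs : List Int) : ∀ acc : Int,
    pyAccumulate acc xs = (List.range xs.length).map (fun p => acc + (xs.take (p + 1)).sum) := by
  induction xs with
  | nil => intro acc; simp [pyAccumulate]
  | cons x xs ih =>
    intro acc
    simp [pyAccumulate, ih, List.range_succ_eq_map, List.map_map, Function.comp, add_assoc]

-- A's row step on a row of shape 1 :: t equals goodRow t (t.length + 2)
theorem stepA_eq (t : List Int) :
    (pyAccumulate 0 (1 :: t)) ++ [(pyAccumulate 0 (1 :: t)).getLast!] =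
      goodRow t (t.length + 2) := by
  have hL : pyAccumulate 0 (1 :: t) = goodRow t (t.length + 1) := by
    simp [pyAccumulate, pyAccumulate_eq, goodRow, List.range_succ_eq_map, List.map_map,
      Function.comp]
  have hlast : (goodRow t (t.length + 1)).getLast! = 1 + (t.take t.length).sum := by
    rw [goodRow_succ]; simp
  rw [hL, hlast, show goodRow t (t.length + 2) = goodRow t (t.length + 1) ++
        [1 + (t.take (t.length + 1)).sum] from goodRow_succ t (t.length + 1)]
  simp [List.take_of_length_le]

-- the state transformer of A's loop body (loop variable unused)
def gA (st : List Int × List (List Int)) : List Int × List (List Int) :=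
  let xqp := pyAccumulate 0 st.1
  let xqp := xqp ++ [xqp.getLast!]
  (xqp, st.2 ++ [xqp])

theorem foldl_const_iterate {α β : Type} (g : β → β) (l : List α) (init : β) :
    l.foldl (fun st _ => g st) init = g^[l.length] init := by
  induction l generalizing init with
  | nil => rfl
  | cons x xs ih => simp [List.foldl_cons, ih, Function.iterate_succ_apply]

theorem iterA (k : Nat) :
    gA^[k] ([1], [[1]]) = (rowRec k, (List.range (k + 1)).map rowRec) := by
  induction k with
  | zero => simp [rowRec]
  | succ k ih =>
    rw [Function.iterate_succ_apply', ih]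
    obtain ⟨t, ht, htl⟩ := rowRec_shape k
    have hs : pyAccumulate 0 (rowRec k) ++ [(pyAccumulate 0 (rowRec k)).getLast!]
        = rowRec (k + 1) := by
      rw [ht, stepA_eq, htl]
      show goodRow t (k + 2) = goodRow (rowRec k).tail (k + 2)
      rw [ht]; rfl
    calc gA (rowRec k, List.map rowRec (List.range (k + 1)))
        = (pyAccumulate 0 (rowRec k) ++ [(pyAccumulate 0 (rowRec k)).getLast!],
           List.map rowRec (List.range (k + 1)) ++
             [pyAccumulate 0 (rowRec k) ++ [(pyAccumulate 0 (rowRec k)).getLast!]]) := rfl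
      _ = (rowRec (k + 1), List.map rowRec (List.range (k + 1 + 1))) := by
            rw [hs]; simp [List.range_succ]

-- partial sums of EZ q along a row give EZ (q+1)
theorem sum_EZ (q : Nat) : ∀ p : Nat,
    1 + ((List.range p).map (fun j => EZ q (j + 1))).sum = EZ (q + 1) p := by
  intro p
  induction p with
  | zero => simp [EZ]
  | succ p ih =>
    rw [List.range_succ, List.map_append, List.sum_append, EZ_rec q p]
    simp [← ih]
    ring

-- rowRec is the closed form
theorem rowRec_eq (q : Nat) : rowRec q = (List.range (q + 1)).map (EZ q) := by
  induction q with
  | zero => simp [rowRec, EZ]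
  | succ q ih =>
    show goodRow (rowRec q).tail (q + 2) = (List.range (q + 2)).map (EZ (q + 1))
    rw [ih, List.range_succ_eq_map, List.map_cons, List.tail_cons, List.map_map]
    unfold goodRow
    apply List.map_congr_left
    intro p hp
    have hp' : p < q + 2 := List.mem_range.mp hp
    by_cases h : p ≤ q
    · rw [← List.map_take, List.take_range, Nat.min_eq_left h]
      simpa [Function.comp] using sum_EZ q p
    · have hpq : p = q + 1 := by omega
      subst hpq
      have htk : (List.range q).take (q + 1) = List.range q := by
        apply List.take_of_length_le; simp
      rw [← List.map_take, htk, EZ_top q]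
      simpa [Function.comp] using sum_EZ q q

-- exact floor division by a positive divisor
theorem floordiv_exact (b m : Int) (hb : 0 < b) :
    PySem.Int.floordiv (b * m) b = m := by
  rw [PySem.Int.floordiv_eq_ediv_of_pos hb, Int.mul_ediv_cancel_left _ (by omega)]

-- B's inner loop invariant: after k steps the state is (C(q+k-1,k-1), first k closed-form entries)
theorem innerB (q : Nat) : ∀ k : Nat, k ≤ q + 1 →
    (List.range k).foldl
      (fun (st : Int × List Int) (p : Nat) =>
        let c := if p = 0 then st.1
                 else PySem.Int.floordiv (st.1 * ((q : Int) + (p : Int))) (p : Int)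
        (c, st.2 ++ [PySem.Int.floordiv (c * ((q : Int) + 1 - (p : Int))) ((q : Int) + 1)]))
      (1, [])
    = ((Nat.choose (q + k - 1) (k - 1) : Int), (List.range k).map (EZ q)) := by
  intro k
  induction k with
  | zero => intro _; simp
  | succ k ih =>
    intro hk
    rw [List.range_succ, List.foldl_append, ih (by omega), List.foldl_cons, List.foldl_nil]
    have hq1 : (0 : Int) < (q : Int) + 1 := by positivity
    cases k with
    | zero =>
      have h1 : ((q : Int) + 1) / ((q : Int) + 1) = 1 := Int.ediv_self (by omega)
      simp [h1, EZ]
    | succ r =>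
      have hne : (r + 1 : Nat) ≠ 0 := by omega
      have hre : q + (r + 1) - 1 = q + r := by omega
      have hre2 : r + 1 - 1 = r := by omega
      have hre3 : q + (r + 1 + 1) - 1 = q + r + 1 := by omega
      have hre4 : r + 1 + 1 - 1 = r + 1 := by omega
      have hc : PySem.Int.floordiv ((Nat.choose (q + r) r : Int) * ((q : Int) + ((r : Int) + 1)))
          ((r : Int) + 1) = (Nat.choose (q + r + 1) (r + 1) : Int) := by
        have hnum : (Nat.choose (q + r) r : Int) * ((q : Int) + ((r : Int) + 1))
            = ((r : Int) + 1) * (Nat.choose (q + r + 1) (r + 1) : Int) := by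
          have := choose_step q r
          linarith
        rw [hnum, floordiv_exact _ _ (by positivity)]
      have hentry : PySem.Int.floordiv ((Nat.choose (q + r + 1) (r + 1) : Int)
          * ((q : Int) + 1 - ((r : Int) + 1))) ((q : Int) + 1) = EZ q (r + 1) := by
        have hnum : (Nat.choose (q + r + 1) (r + 1) : Int) * ((q : Int) + 1 - ((r : Int) + 1))
            = ((q : Int) + 1) * EZ q (r + 1) := by
          have := EZ_mul q (r + 1) (by omega)
          have e : q + (r + 1) = q + r + 1 := by omega
          rw [e] at this
          push_cast at this ⊢
          linarith
        rw [hnum, floordiv_exact _ _ hq1]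
      simp only [hre, hre2, hre3, hre4, if_neg hne, List.range_succ, List.map_append,
        List.map_cons, List.map_nil]
      push_cast
      rw [hc, hentry]

theorem xballot_numberss_by_accumulate_spec : Claim_equal_xballot_numberss_by_accumulate := by
  intro Q _
  unfold Spec_xballot_numberss_by_accumulate
  by_cases hQ : Q ≤ 0
  · simp [xballot_numberss_by_accumulate, xballot_numberss_by_accumulate_alt, hQ]
  · have hA : xballot_numberss_by_accumulate Q
        = ((PySem.List.pyRange 1 Q 1).foldl (fun st _ => gA st) ([1], [[1]])).2 := by
      simp [xballot_numberss_by_accumulate, hQ, gA]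
    rw [hA, foldl_const_iterate, PySem.List.length_pyRange_one, iterA]
    have hn : (Q - 1).toNat + 1 = Q.toNat := by omega
    rw [hn]
    rw [xballot_numberss_by_accumulate_alt, if_neg hQ,
      PySem.List.foldl_append_singleton_eq_map]
    apply List.map_congr_left
    intro q _
    rw [innerB q (q + 1) (le_refl _), rowRec_eq]
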